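-- pv_equiv track=rewrite | github.com/Electra2707/OneTrickPonyPython | Actually Code/tutorial/Python Tutorial Coding/Ep2/ListComp6.py | flatten_double_and_filter
-- ===== SOURCE A (Python) =====
-- def flatten_double_and_filter(lst):
--     flattened = []
--     for sublist in lst:
--         for item in sublist:
--             flattened.append(item)
--     doubled = []
--     for number in flattened:
--         result = number * 2
--         if result % 2 == 0:
--             doubled.append(result)
--     return doubled
-- ===== SOURCE B (Python) =====
-- def flatten_double_and_filter(lst):
--     if not lst:
--         return []
--     first = [x * 2 for x in lst[0] if (x * 2) % 2 == 0]
--     return first + flatten_double_and_filter(lst[1:])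
-- ===== Notes on version B (the rewrite author's own statement) =====
-- stated objective: alternative
-- what changed: Replaces A's two staged imperative passes (flatten into an intermediate list, then append-style double-and-filter loop) with structural recursion on the outer list, handling each sublist by a filter+map comprehension and concatenating the per-sublist results.
import Mathlib
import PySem

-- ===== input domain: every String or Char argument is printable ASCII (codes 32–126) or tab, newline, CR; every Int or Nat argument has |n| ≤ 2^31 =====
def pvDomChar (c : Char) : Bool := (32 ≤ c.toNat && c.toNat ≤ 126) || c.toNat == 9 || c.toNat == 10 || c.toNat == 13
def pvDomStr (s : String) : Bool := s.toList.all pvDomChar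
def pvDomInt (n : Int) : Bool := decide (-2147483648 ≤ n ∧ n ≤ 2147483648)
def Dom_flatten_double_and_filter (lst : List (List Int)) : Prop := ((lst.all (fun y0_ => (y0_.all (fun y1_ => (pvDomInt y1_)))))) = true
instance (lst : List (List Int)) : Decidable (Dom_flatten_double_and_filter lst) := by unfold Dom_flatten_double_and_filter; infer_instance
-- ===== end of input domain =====

-- B replaces A's two imperative passes with structural recursion on the outer list,
-- a filter+map comprehension per sublist, and concatenation (objective: alternative).

-- ===== PORT A =====
def flatten_double_and_filter (lst : List (List Int)) : List Int :=
  let flattened := lst.foldl (fun acc sublist =>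
    sublist.foldl (fun acc item => acc ++ [item]) acc) []
  flattened.foldl (fun doubled number =>
    let result := number * 2
    if PySem.Int.mod result 2 = 0 then doubled ++ [result] else doubled) []

-- ===== PORT B =====
def flatten_double_and_filter_alt : List (List Int) → List Int
  | [] => []
  | sub :: rest =>
      ((sub.filter (fun x => PySem.Int.mod (x * 2) 2 == 0)).map (fun x => x * 2))
        ++ flatten_double_and_filter_alt rest

-- ===== PRECONDITION & SPEC =====
def Spec_flatten_double_and_filter (lst : List (List Int)) (out : List Int) : Prop := out = flatten_double_and_filter_alt lst
instance (lst : List (List Int)) (out : List Int) : Decidable (Spec_flatten_double_and_filter lst out) := by unfold Spec_flatten_double_and_filter; infer_instance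

-- ===== CLAIM =====
def Claim_equal_flatten_double_and_filter : Prop := ∀ (lst : List (List Int)), Dom_flatten_double_and_filter lst → Spec_flatten_double_and_filter lst (flatten_double_and_filter lst)

-- ===== LEMMAS AND PROOFS =====

-- A's second-pass step and its closed form
def pvStep (doubled : List Int) (item : Int) : List Int :=
  if PySem.Int.mod (item * 2) 2 = 0 then doubled ++ [item * 2] else doubled

def pvDbl (l : List Int) : List Int :=
  (l.filter (fun x => PySem.Int.mod (x * 2) 2 == 0)).map (fun x => x * 2)

theorem pv_append_fold (sub : List Int) (acc : List Int) :
    sub.foldl (fun acc item => acc ++ [item]) acc = acc ++ sub := by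
  induction sub generalizing acc with
  | nil => simp
  | cons x xs ih => simp [List.foldl_cons, ih]

theorem pv_flatten_fold (lst : List (List Int)) (acc : List Int) :
    lst.foldl (fun acc sublist => sublist.foldl (fun acc item => acc ++ [item]) acc) acc
      = acc ++ lst.flatten := by
  induction lst generalizing acc with
  | nil => simp
  | cons s ss ih => rw [List.foldl_cons, pv_append_fold, ih, List.append_assoc, List.flatten_cons]

theorem pv_fold_dbl (l : List Int) (d : List Int) :
    l.foldl pvStep d = d ++ pvDbl l := by
  induction l generalizing d with
  | nil => simp [pvDbl]
  | cons x xs ih =>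
    simp only [List.foldl_cons, ih, pvStep, pvDbl]
    by_cases h : PySem.Int.mod (x * 2) 2 = 0 <;>
      simp [h]

theorem pv_alt_dbl (lst : List (List Int)) :
    flatten_double_and_filter_alt lst = pvDbl lst.flatten := by
  induction lst with
  | nil => simp [flatten_double_and_filter_alt, pvDbl]
  | cons s ss ih =>
    simp [flatten_double_and_filter_alt, ih, pvDbl, List.filter_append]

-- ===== VERDICT =====
theorem flatten_double_and_filter_spec : Claim_equal_flatten_double_and_filter := by
  intro lst _
  unfold Spec_flatten_double_and_filter flatten_double_and_filter
  show (lst.foldl (fun acc sublist => sublist.foldl (fun acc item => acc ++ [item]) acc) []).foldl pvStep []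
      = flatten_double_and_filter_alt lst
  rw [pv_flatten_fold, pv_fold_dbl, pv_alt_dbl]
  simp
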